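-- pv_equiv track=rewrite | github.com/TropinNikolay/pyswitch | pyswitch.py | switch_loop
-- ===== SOURCE A (Python) =====
-- def switch_loop(line: str, source_code: list):
--     """
--     This function changing only one switch-case statement
--     :param line: line of source code with switch statement
--     :param source_code: lines of source code (either from exec statement or function docstring)
--     :return: str, modified switch-case part of source code (in terms of if-else statement)
--     """
--     left_parameter = line[line.index("switch") + 7: line.index(":")]
--     code = ""
--     insert_from = line.index("switch")
--     code += " " * insert_from + "while True:\n"
--     indent = insert_from + 4
--     while True:
--         try:
--             line = source_code.pop(0)
--             if line.startswith(" " * indent) and "switch" in line: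
--                 code += switch_loop(line, source_code)
--             elif line.startswith(" " * indent):
--                 try:
--                     right_parameter = line[line.index("case") + 5: line.index(":")]
--                     code += line.replace(f"case {right_parameter}", f"if ({left_parameter}) == ({right_parameter})") + "\n"
--                 except ValueError:
--                     code += line + "\n"
--             else:
--                 code += " " * indent + "break\n"
--                 source_code.insert(0, line)
--                 indent -= 4
--                 break
--         except IndexError:
--             code += " " * indent + "break\n"
--             break
--     return code
-- ===== SOURCE B (Python) =====
-- def switch_loop(line: str, source_code: list):
--     """One forward pass over the lines with a stack of (left_parameter, indent)
--     frames: dedents pop frames in a batch (one 'break' each), EOF flushes the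
--     stack; no recursion and no re-insertion of lines."""
--     ins = line.index("switch")
--     stack = [(line[ins + 7: line.index(":")], ins + 4)]
--     parts = [" " * ins + "while True:\n"]
--     consumed = 0
--     for ln in source_code:
--         while stack and not ln.startswith(" " * stack[-1][1]):
--             parts.append(" " * stack.pop()[1] + "break\n")
--         if not stack:
--             break
--         consumed += 1
--         left = stack[-1][0]
--         if "switch" in ln:
--             j = ln.index("switch")
--             parts.append(" " * j + "while True:\n")
--             stack.append((ln[j + 7: ln.index(":")], j + 4))
--         else:
--             try:
--                 right = ln[ln.index("case") + 5: ln.index(":")]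
--                 parts.append(ln.replace(f"case {right}", f"if ({left}) == ({right})") + "\n")
--             except ValueError:
--                 parts.append(ln + "\n")
--     else:
--         while stack:
--             parts.append(" " * stack.pop()[1] + "break\n")
--     del source_code[:consumed]
--     return "".join(parts)
-- ===== Notes on version B (the rewrite author's own statement) =====
-- stated objective: alternative
-- what changed: Replaces A's recursion (one nested call per inner switch, popping lines and re-inserting a dedented line for the caller to re-test) by one forward for-loop over the lines with an explicit stack of (left_parameter, indent) frames, a batched while-pop that emits one 'break' per dedented frame, and a for-else flush of the stack at end of input.
import Mathlib
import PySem

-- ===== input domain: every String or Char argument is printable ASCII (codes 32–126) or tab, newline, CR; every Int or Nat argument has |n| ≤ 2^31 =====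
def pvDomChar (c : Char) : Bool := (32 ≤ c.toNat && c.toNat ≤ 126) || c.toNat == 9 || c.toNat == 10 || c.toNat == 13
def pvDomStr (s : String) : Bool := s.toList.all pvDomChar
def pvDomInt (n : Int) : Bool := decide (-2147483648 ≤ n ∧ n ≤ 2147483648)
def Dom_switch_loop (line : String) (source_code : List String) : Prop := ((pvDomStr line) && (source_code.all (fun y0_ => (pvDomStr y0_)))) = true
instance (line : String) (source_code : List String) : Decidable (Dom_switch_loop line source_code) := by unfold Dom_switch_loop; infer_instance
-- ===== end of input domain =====

-- B replaces A's recursion-with-re-insertion by one forward pass over the lines with a stack of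
-- (left_parameter, indent) frames, a batched break-popping helper and an end-of-input flush
-- (objective: alternative, same cost). Both Pythons consume source_code in place identically;
-- the equivalence proved here is about the return value.

-- shared per-line helpers: both Pythons transform a single line with the exact same expressions
def pvSp (n : Nat) : List Char := List.replicate n ' '
def pvIns (l : List Char) : Nat := (PySem.Chars.find l "switch".toList).toNat
def pvLeft (l : List Char) : List Char :=
  PySem.Chars.slice l (some (PySem.Chars.find l "switch".toList + 7)) (some (PySem.Chars.find l ":".toList))
def pvHdr (l : List Char) : List Char := pvSp (pvIns l) ++ "while True:\n".toList
def pvBrk (ind : Nat) : List Char := pvSp ind ++ "break\n".toList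
def pvRight (ln : List Char) : List Char :=
  PySem.Chars.slice ln (some (PySem.Chars.find ln "case".toList + 5)) (some (PySem.Chars.find ln ":".toList))
def pvCase (lp ln : List Char) : List Char :=
  if PySem.Chars.isIn "case".toList ln && PySem.Chars.isIn ":".toList ln then
    PySem.Chars.replace ln ("case ".toList ++ pvRight ln)
      ("if (".toList ++ lp ++ ") == (".toList ++ pvRight ln ++ ")".toList) ++ "\n".toList
  else ln ++ "\n".toList

-- ===== PORT A =====
-- A's inner `while True` loop; the recursive `switch_loop(line, source_code)` call is inlined as the
-- first branch (header emission + loop on the popped tail). Fuel: one unit per consumed line suffices.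
def pvLoopA : Nat → List Char → Nat → List Char → List (List Char) → List Char × List (List Char)
  | 0, _, _, code, src => (code, src)
  | Nat.succ f, lp, ind, code, src =>
    match src with
    | [] => (code ++ pvBrk ind, [])
    | ln :: rest =>
      if PySem.Chars.startswith ln (pvSp ind) && PySem.Chars.isIn "switch".toList ln then
        let res := pvLoopA f (pvLeft ln) (pvIns ln + 4) (pvHdr ln) rest
        pvLoopA f lp ind (code ++ res.1) res.2
      else if PySem.Chars.startswith ln (pvSp ind) then
        pvLoopA f lp ind (code ++ pvCase lp ln) rest
      else (code ++ pvBrk ind, ln :: rest)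

def switch_loop (line : String) (source_code : List String) : String :=
  String.ofList (pvLoopA (source_code.length + 1) (pvLeft line.toList) (pvIns line.toList + 4)
    (pvHdr line.toList) (source_code.map String.toList)).1

-- ===== PORT B =====
-- Source B's inner `while stack and not ln.startswith(...)`: pop frames, one "break" per frame
def pvPop : List (List Char × Nat) → List Char → List Char × List (List Char × Nat)
  | [], _ => ([], [])
  | (lp, ind) :: stk, ln =>
    if PySem.Chars.startswith ln (pvSp ind) then ([], (lp, ind) :: stk)
    else ((pvBrk ind) ++ (pvPop stk ln).1, (pvPop stk ln).2)

-- Source B's end-of-input `while stack:` flush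
def pvFlush : List (List Char × Nat) → List Char
  | [] => []
  | (_, ind) :: stk => pvBrk ind ++ pvFlush stk

-- Source B's `for ln in source_code:` pass (with the for-else flush); `parts` join = concatenation
def pvRun : List (List Char) → List (List Char × Nat) → List Char → List Char
  | [], stack, out => out ++ pvFlush stack
  | ln :: rest, stack, out =>
    match (pvPop stack ln).2 with
    | [] => out ++ (pvPop stack ln).1
    | (lp, ind) :: stk' =>
      if PySem.Chars.isIn "switch".toList ln then
        pvRun rest ((pvLeft ln, pvIns ln + 4) :: (lp, ind) :: stk') (out ++ (pvPop stack ln).1 ++ pvHdr ln)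
      else
        pvRun rest ((lp, ind) :: stk') (out ++ (pvPop stack ln).1 ++ pvCase lp ln)

def switch_loop_alt (line : String) (source_code : List String) : String :=
  String.ofList (pvRun (source_code.map String.toList)
    [(pvLeft line.toList, pvIns line.toList + 4)] (pvHdr line.toList))

-- ===== PRECONDITION & SPEC =====
-- Pre_ excludes exactly the inputs on which A raises ValueError: a header line missing "switch"
-- or ":", or a line with "switch" but no ":" inside the consumed prefix (A consumes source lines
-- exactly up to the first one not indented past the header's switch column, and raises on any
-- consumed switch line without ":").
def Pre_switch_loop (line : String) (source_code : List String) : Prop :=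
  PySem.Str.isIn "switch" line = true ∧ PySem.Str.isIn ":" line = true ∧
  ∀ s ∈ source_code.takeWhile (fun s => PySem.Str.startswith s
      (String.ofList (List.replicate ((PySem.Chars.find line.toList "switch".toList).toNat + 4) ' '))),
    PySem.Str.isIn "switch" s = true → PySem.Str.isIn ":" s = true
instance (line : String) (source_code : List String) : Decidable (Pre_switch_loop line source_code) := by
  unfold Pre_switch_loop; infer_instance
def pvWitness_switch_loop : String × List String :=
  ("switch a:", ["    case 1:", "        x = 1"])

def Spec_switch_loop (line : String) (source_code : List String) (out : String) : Prop := out = switch_loop_alt line source_code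
instance (line : String) (source_code : List String) (out : String) : Decidable (Spec_switch_loop line source_code out) := by unfold Spec_switch_loop; infer_instance

-- ===== CLAIM (what is proved, stated in full; the proofs are below) =====
def Claim_equal_switch_loop : Prop := ∀ (line : String) (source_code : List String), Dom_switch_loop line source_code → Pre_switch_loop line source_code → Spec_switch_loop line source_code (switch_loop line source_code)

-- ===== LEMMAS AND PROOFS =====

-- proof-only intermediate: a fuelled stack machine that steps one frame test at a time; it is
-- proved equal to A's loop (pvSim) and to B's pass (pvGoB_eq_run), bridging the two ports
def pvGoB : Nat → List (List Char × Nat) → List Char → List (List Char) → List Char × List (List Char)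
  | 0, _, out, src => (out, src)
  | Nat.succ f, stack, out, src =>
    match stack, src with
    | [], _ => (out, src)
    | (_, ind) :: stk, [] => pvGoB f stk (out ++ pvBrk ind) []
    | (lp, ind) :: stk, ln :: rest =>
      if PySem.Chars.startswith ln (pvSp ind) && PySem.Chars.isIn "switch".toList ln then
        pvGoB f ((pvLeft ln, pvIns ln + 4) :: (lp, ind) :: stk) (out ++ pvHdr ln) rest
      else if PySem.Chars.startswith ln (pvSp ind) then
        pvGoB f ((lp, ind) :: stk) (out ++ pvCase lp ln) rest
      else
        pvGoB f stk (out ++ pvBrk ind) (ln :: rest)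

-- A's loop never re-inserts more than the line it just popped
theorem pvLoopA_len : ∀ (f : Nat) (lp : List Char) (ind : Nat) (code : List Char)
    (src : List (List Char)), (pvLoopA f lp ind code src).2.length ≤ src.length := by
  intro f
  induction f with
  | zero => intro lp ind code src; simp [pvLoopA]
  | succ f ih =>
    intro lp ind code src
    cases src with
    | nil => simp [pvLoopA]
    | cons ln rest =>
      simp only [pvLoopA]
      split_ifs with h1 h2
      · exact le_trans (ih _ _ _ _) (le_trans (ih _ _ _ _) (by simp))
      · exact le_trans (ih _ _ _ _) (by simp)
      · simp

-- accumulator lemma for A's `code +=`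
theorem pvLoopA_acc : ∀ (f : Nat) (lp : List Char) (ind : Nat) (c1 c2 : List Char)
    (src : List (List Char)), pvLoopA f lp ind (c1 ++ c2) src =
      (c1 ++ (pvLoopA f lp ind c2 src).1, (pvLoopA f lp ind c2 src).2) := by
  intro f
  induction f with
  | zero => intro lp ind c1 c2 src; simp [pvLoopA]
  | succ f ih =>
    intro lp ind c1 c2 src
    cases src with
    | nil => simp [pvLoopA]
    | cons ln rest =>
      simp only [pvLoopA]
      split_ifs with h1 h2
      · rw [List.append_assoc, ih, ih]
      · rw [List.append_assoc, ih, ih]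
      · simp

-- pvGoB's result does not depend on the fuel once the fuel covers the step count
theorem pvGoB_fuel : ∀ (F G : Nat) (stack : List (List Char × Nat)) (out : List Char)
    (src : List (List Char)), 2 * src.length + stack.length + 1 ≤ F →
    2 * src.length + stack.length + 1 ≤ G → pvGoB F stack out src = pvGoB G stack out src := by
  intro F
  induction F with
  | zero => intro G stack out src hF; omega
  | succ F ih =>
    intro G stack out src hF hG
    cases G with
    | zero => omega
    | succ G =>
      cases stack with
      | nil => simp [pvGoB]
      | cons fr stk =>
        obtain ⟨lp, ind⟩ := fr
        cases src with
        | nil =>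
          simp only [pvGoB]
          exact ih _ _ _ _ (by simp at hF ⊢; omega) (by simp at hG ⊢; omega)
        | cons ln rest =>
          simp only [pvGoB]
          split_ifs with h1 h2
          · exact ih _ _ _ _ (by simp at hF ⊢; omega) (by simp at hG ⊢; omega)
          · exact ih _ _ _ _ (by simp at hF ⊢; omega) (by simp at hG ⊢; omega)
          · exact ih _ _ _ _ (by simp at hF ⊢; omega) (by simp at hG ⊢; omega)

-- accumulator lemma, general form
theorem pvLoopA_acc' (f : Nat) (lp : List Char) (ind : Nat) (c : List Char)
    (src : List (List Char)) : pvLoopA f lp ind c src =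
      (c ++ (pvLoopA f lp ind [] src).1, (pvLoopA f lp ind [] src).2) := by
  simpa using pvLoopA_acc f lp ind c [] src

-- an empty frame stack stops pvGoB at once
theorem pvGoB_nil (F : Nat) (out : List Char) (src : List (List Char)) :
    pvGoB (F + 1) [] out src = (out, src) := by
  simp [pvGoB]

-- simulation: running pvGoB with one more frame = finishing A's loop for that frame, then continuing
theorem pvSim : ∀ (f : Nat) (lp : List Char) (ind : Nat) (src : List (List Char))
    (stk : List (List Char × Nat)) (out : List Char) (F G : Nat),
    src.length + 1 ≤ f →
    2 * src.length + (stk.length + 1) + 1 ≤ F →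
    2 * (pvLoopA f lp ind [] src).2.length + stk.length + 1 ≤ G →
    pvGoB F ((lp, ind) :: stk) out src =
      pvGoB G stk (out ++ (pvLoopA f lp ind [] src).1) (pvLoopA f lp ind [] src).2 := by
  intro f
  induction f with
  | zero => intro lp ind src stk out F G h1 hF hG; omega
  | succ f ih =>
    intro lp ind src stk out F G h1 hF hG
    cases F with
    | zero => omega
    | succ F =>
      cases src with
      | nil =>
        simp only [pvLoopA, List.nil_append] at hG ⊢
        simp only [pvGoB]
        exact pvGoB_fuel _ _ _ _ _ (by simp at hF ⊢; omega) (by simpa using hG)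
      | cons ln rest =>
        simp only [pvLoopA, pvGoB] at hG ⊢
        split_ifs at hG ⊢ with hc1 hc2
        · -- nested switch line
          have hr0 := pvLoopA_acc' f (pvLeft ln) (pvIns ln + 4) (pvHdr ln) rest
          rw [hr0] at hG ⊢
          simp only [List.nil_append] at hG ⊢
          rw [pvLoopA_acc' f lp ind
            (pvHdr ln ++ (pvLoopA f (pvLeft ln) (pvIns ln + 4) [] rest).1)
            (pvLoopA f (pvLeft ln) (pvIns ln + 4) [] rest).2] at hG ⊢
          have hlr : (pvLoopA f (pvLeft ln) (pvIns ln + 4) [] rest).2.length ≤ rest.length :=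
            pvLoopA_len f _ _ _ _
          rw [ih (pvLeft ln) (pvIns ln + 4) rest ((lp, ind) :: stk) (out ++ pvHdr ln) F
            (2 * (pvLoopA f (pvLeft ln) (pvIns ln + 4) [] rest).2.length + (stk.length + 1) + 1)
            (by simp at h1; omega) (by simp at hF; simp; omega) (le_refl _)]
          rw [ih lp ind (pvLoopA f (pvLeft ln) (pvIns ln + 4) [] rest).2 stk
            ((out ++ pvHdr ln) ++ (pvLoopA f (pvLeft ln) (pvIns ln + 4) [] rest).1)
            (2 * (pvLoopA f (pvLeft ln) (pvIns ln + 4) [] rest).2.length + (stk.length + 1) + 1) G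
            (by simp at h1; omega) (le_refl _) hG]
          simp [List.append_assoc]
        · -- case / plain line
          rw [List.nil_append, pvLoopA_acc' f lp ind (pvCase lp ln) rest] at hG ⊢
          rw [ih lp ind rest stk (out ++ pvCase lp ln) F G
            (by simp at h1; omega) (by simp at hF; simp; omega) hG]
          simp [List.append_assoc]
        · -- dedent: frame is popped, the line is re-tested against the outer frame
          simp only [List.nil_append] at hG ⊢
          exact pvGoB_fuel _ _ _ _ _ (by simp at hF; simp; omega) (by simpa using hG)

-- unfolding lemmas for pvRun on a cons line, by the shape of the popped stack
theorem pvRun_cons_nil (ln : List Char) (rest : List (List Char)) (stack : List (List Char × Nat))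
    (out : List Char) (h : (pvPop stack ln).2 = []) :
    pvRun (ln :: rest) stack out = out ++ (pvPop stack ln).1 := by
  simp only [pvRun, h]

theorem pvRun_cons_top (ln : List Char) (rest : List (List Char)) (stack : List (List Char × Nat))
    (out lp : List Char) (ind : Nat) (stk' : List (List Char × Nat))
    (h : (pvPop stack ln).2 = (lp, ind) :: stk') :
    pvRun (ln :: rest) stack out =
      if PySem.Chars.isIn "switch".toList ln then
        pvRun rest ((pvLeft ln, pvIns ln + 4) :: (lp, ind) :: stk') (out ++ (pvPop stack ln).1 ++ pvHdr ln)
      else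
        pvRun rest ((lp, ind) :: stk') (out ++ (pvPop stack ln).1 ++ pvCase lp ln) := by
  simp only [pvRun, h]

-- popping a frame first, then running, is running with the frame's break pre-emitted
theorem pvRun_pop (ln : List Char) (rest : List (List Char)) (stk : List (List Char × Nat))
    (out lp : List Char) (ind : Nat) (hs : ¬ PySem.Chars.startswith ln (pvSp ind) = true) :
    pvRun (ln :: rest) ((lp, ind) :: stk) out = pvRun (ln :: rest) stk (out ++ pvBrk ind) := by
  have hp : pvPop ((lp, ind) :: stk) ln
      = (pvBrk ind ++ (pvPop stk ln).1, (pvPop stk ln).2) := by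
    simp [pvPop, hs]
  cases h2 : (pvPop stk ln).2 with
  | nil =>
    rw [pvRun_cons_nil ln rest ((lp, ind) :: stk) out (by rw [hp]; exact h2),
        pvRun_cons_nil ln rest stk (out ++ pvBrk ind) h2, hp]
    simp
  | cons fr2 stk2 =>
    obtain ⟨lp2, ind2⟩ := fr2
    rw [pvRun_cons_top ln rest ((lp, ind) :: stk) out lp2 ind2 stk2 (by rw [hp]; exact h2),
        pvRun_cons_top ln rest stk (out ++ pvBrk ind) lp2 ind2 stk2 h2, hp]
    split_ifs with hw <;> simp

-- the stack machine with enough fuel computes B's pass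
theorem pvGoB_eq_run : ∀ (F : Nat) (stack : List (List Char × Nat)) (out : List Char)
    (src : List (List Char)), 2 * src.length + stack.length + 1 ≤ F →
    (pvGoB F stack out src).1 = pvRun src stack out := by
  intro F
  induction F with
  | zero => intro stack out src hF; omega
  | succ F ih =>
    intro stack out src hF
    cases stack with
    | nil =>
      cases src with
      | nil => simp [pvGoB, pvRun, pvFlush]
      | cons ln rest => simp [pvGoB, pvRun, pvPop]
    | cons fr stk =>
      obtain ⟨lp, ind⟩ := fr
      cases src with
      | nil =>
        simp only [pvGoB, pvRun, pvFlush]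
        rw [ih stk (out ++ pvBrk ind) [] (by simp at hF ⊢; omega)]
        simp [pvRun, List.append_assoc]
      | cons ln rest =>
        by_cases hs : PySem.Chars.startswith ln (pvSp ind) = true
        · have hp : pvPop ((lp, ind) :: stk) ln = ([], (lp, ind) :: stk) := by
            simp [pvPop, hs]
          by_cases hw : PySem.Chars.isIn "switch".toList ln = true
          · simp only [pvGoB, hs, hw, Bool.and_self, if_true]
            rw [ih ((pvLeft ln, pvIns ln + 4) :: (lp, ind) :: stk) (out ++ pvHdr ln) rest
              (by simp at hF ⊢; omega)]
            rw [pvRun_cons_top ln rest ((lp, ind) :: stk) out lp ind stk (by rw [hp]),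
                if_pos hw, hp]
            simp
          · simp only [pvGoB, hs, hw, Bool.and_false, Bool.false_eq_true, if_false, if_true]
            rw [ih ((lp, ind) :: stk) (out ++ pvCase lp ln) rest (by simp at hF ⊢; omega)]
            rw [pvRun_cons_top ln rest ((lp, ind) :: stk) out lp ind stk (by rw [hp]),
                if_neg hw, hp]
            simp
        · have hb : (PySem.Chars.startswith ln (pvSp ind) && PySem.Chars.isIn "switch".toList ln) = false := by
            simp [hs]
          simp only [pvGoB, hb, Bool.false_eq_true, if_false]
          rw [if_neg hs]
          rw [ih stk (out ++ pvBrk ind) (ln :: rest) (by simp at hF ⊢; omega)]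
          exact (pvRun_pop ln rest stk out lp ind hs).symm

-- ===== VERDICT (by name: the statement is the Claim_ definition above) =====
theorem switch_loop_spec : Claim_equal_switch_loop := by
  unfold Claim_equal_switch_loop Spec_switch_loop
  intro line src _ _
  unfold switch_loop switch_loop_alt
  rw [← pvGoB_eq_run (2 * src.length + 2) _ _ _ (by simp)]
  rw [pvSim (src.length + 1) (pvLeft line.toList) (pvIns line.toList + 4)
      (src.map String.toList) [] (pvHdr line.toList) (2 * src.length + 2)
      (2 * (pvLoopA (src.length + 1) (pvLeft line.toList) (pvIns line.toList + 4) []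
        (src.map String.toList)).2.length + 0 + 1)
      (by simp) (by simp) (le_refl _)]
  rw [pvGoB_nil, pvLoopA_acc' (src.length + 1) (pvLeft line.toList) (pvIns line.toList + 4)
      (pvHdr line.toList) (src.map String.toList)]
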